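-- pv_equiv track=rewrite | github.com/Wonjin-Lee/Programmers | Level1/lv1_12.py | solution
-- ===== SOURCE A (Python) =====
-- def solution(s):
--     answer = ''
--
--     lower = []
--     upper = []
--
--     for i in range(len(s)):
--         if s[i].islower():
--             lower.append(s[i])
--         elif s[i].isupper():
--             upper.append(s[i])
--
--     lower.sort()
--     upper.sort()
--
--     lower.reverse()
--     upper.reverse()
--
--     result = lower + upper
--     answer = ''.join(result)
--
--     return answer
-- ===== SOURCE B (Python) =====
-- def solution(s):
--     # Counting sort over the fixed 26+26 letter alphabet: count each letter,
--     # then emit the letters (lowercase z..a, then uppercase Z..A) count times.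
--     out = []
--     for base in (122, 90):          # ord('z'), ord('Z')
--         for code in range(base, base - 26, -1):
--             ch = chr(code)
--             out.append(ch * s.count(ch))
--     return ''.join(out)
-- ===== Notes on version B (the rewrite author's own statement) =====
-- stated objective: faster
-- what changed: Replaces A's per-character filter loop plus two comparison sorts (sort then reverse) by a counting sort over the fixed 52-letter alphabet: count each letter with s.count, then emit the letters z..a and Z..A count times.
import Mathlib
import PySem

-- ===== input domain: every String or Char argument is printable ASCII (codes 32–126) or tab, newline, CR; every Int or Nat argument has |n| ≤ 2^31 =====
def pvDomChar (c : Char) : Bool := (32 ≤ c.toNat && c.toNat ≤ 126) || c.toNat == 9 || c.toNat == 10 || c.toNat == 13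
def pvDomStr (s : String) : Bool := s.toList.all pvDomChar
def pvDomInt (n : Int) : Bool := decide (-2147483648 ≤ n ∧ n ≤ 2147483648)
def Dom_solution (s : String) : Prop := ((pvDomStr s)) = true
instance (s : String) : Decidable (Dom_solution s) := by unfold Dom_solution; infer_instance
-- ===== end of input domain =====

-- B replaces A's two sorts by a single counting pass over the fixed 52-letter alphabet (counting sort); return value only, no mutation.

-- ===== PORT A =====
def solution (s : String) : String :=
  let cs := s.toList
  let p := (PySem.List.pyRange 0 (PySem.Str.len s) 1).foldl
      (fun (acc : List Char × List Char) i =>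
        let c := PySem.List.pyGetD cs i ' '
        if PySem.Chars.islower c then (acc.1 ++ [c], acc.2)
        else if PySem.Chars.isupper c then (acc.1, acc.2 ++ [c])
        else acc) ([], [])
  -- lower.sort(); lower.reverse()  (and the same for upper)
  let lower := (PySem.List.sorted p.1 (fun x => x) false).reverse
  let upper := (PySem.List.sorted p.2 (fun x => x) false).reverse
  -- ''.join over a list of single characters is exactly the string of those characters
  String.ofList (lower ++ upper)

-- ===== PORT B =====
def solution_alt (s : String) : String :=
  let out := [(122 : Int), 90].foldl (fun acc base =>
      (PySem.List.pyRange base (base - 26) (-1)).foldl (fun acc code =>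
        let ch := Char.ofNat code.toNat
        -- out.append(ch * s.count(ch)); ''.join concatenates, so we accumulate the characters
        acc ++ List.replicate (PySem.Str.count s (String.ofList [ch])) ch) acc) []
  String.ofList out

-- ===== PRECONDITION & SPEC =====
def Spec_solution (s : String) (out : String) : Prop := out = solution_alt s
instance (s : String) (out : String) : Decidable (Spec_solution s out) := by unfold Spec_solution; infer_instance

-- ===== CLAIM (what is proved, stated in full; the proofs are below) =====
def Claim_equal_solution : Prop := ∀ (s : String), Dom_solution s → Spec_solution s (solution s)

-- ===== LEMMAS AND PROOFS =====

-- counting a character in a flatMap of replicates over distinct letters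
theorem pv_count_flatMap_replicate (letters : List Char) (hnd : letters.Nodup)
    (cnt : Char → Nat) (a : Char) :
    (letters.flatMap (fun ch => List.replicate (cnt ch) ch)).count a
      = if a ∈ letters then cnt a else 0 := by
  induction letters with
  | nil => simp
  | cons h t ih =>
    simp only [List.flatMap_cons, List.count_append, List.count_replicate,
      List.nodup_cons] at *
    rcases hnd with ⟨hnotmem, hnd⟩
    by_cases hah : a = h
    · subst hah
      simp [ih hnd, hnotmem]
    · simp [Ne.symm hah, hah, ih hnd]

-- the flatMap of replicates over an ascending letter list is weakly ascending
theorem pv_pairwise_flatMap_replicate (letters : List Char)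
    (hs : letters.Pairwise (· < ·)) (cnt : Char → Nat) :
    (letters.flatMap (fun ch => List.replicate (cnt ch) ch)).Pairwise (· ≤ ·) := by
  induction letters with
  | nil => simp
  | cons h t ih =>
    simp only [List.flatMap_cons] at *
    rcases List.pairwise_cons.mp hs with ⟨hlt, hs'⟩
    refine List.pairwise_append.mpr ⟨?_, ih hs', ?_⟩
    · simp [List.pairwise_replicate]
    · intro x hx y hy
      rcases List.eq_of_mem_replicate hx with rfl
      rcases List.mem_flatMap.mp hy with ⟨ch, hch, hy'⟩
      rcases List.eq_of_mem_replicate hy' with rfl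
      exact le_of_lt (hlt _ hch)

-- Python's sorted on a list drawn from a given ascending distinct letter list
-- is the flatMap of replicates (counting sort is a correct sort)
theorem pv_sorted_eq_flatMap (letters l : List Char) (cnt : Char → Nat)
    (hnd : letters.Nodup) (hs : letters.Pairwise (· < ·))
    (hmem : ∀ c ∈ l, c ∈ letters) (hcnt : ∀ a ∈ letters, cnt a = l.count a) :
    PySem.List.sorted l (fun x => x) false
      = letters.flatMap (fun ch => List.replicate (cnt ch) ch) := by
  apply PySem.List.sorted_id_eq_of_perm_of_pairwise
  · refine List.perm_iff_count.mpr (fun a => ?_)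
    rw [pv_count_flatMap_replicate letters hnd cnt a]
    by_cases ha : a ∈ letters
    · simp [ha, hcnt a ha]
    · have : a ∉ l := fun hal => ha (hmem a hal)
      simp [ha, List.count_eq_zero.mpr this]
  · exact pv_pairwise_flatMap_replicate letters hs cnt

-- descending variant, matching A's sort-then-reverse
theorem pv_sorted_reverse_eq_flatMap (letters l : List Char) (cnt : Char → Nat)
    (hnd : letters.Nodup) (hs : letters.Pairwise (· > ·))
    (hmem : ∀ c ∈ l, c ∈ letters.reverse) (hcnt : ∀ a ∈ letters, cnt a = l.count a) :
    (PySem.List.sorted l (fun x => x) false).reverse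
      = letters.flatMap (fun ch => List.replicate (cnt ch) ch) := by
  have h1 : PySem.List.sorted l (fun x => x) false
      = letters.reverse.flatMap (fun ch => List.replicate (cnt ch) ch) := by
    refine pv_sorted_eq_flatMap letters.reverse l cnt (List.nodup_reverse.mpr hnd) ?_ hmem ?_
    · exact (List.pairwise_reverse.mpr hs)
    · intro a ha; exact hcnt a (List.mem_reverse.mp ha)
  rw [h1, List.reverse_flatMap]
  simp [Function.comp_def, List.reverse_replicate]

-- character-class facts
theorem pv_islower_iff (c : Char) :
    PySem.Chars.islower c = true ↔ 97 ≤ c.toNat ∧ c.toNat ≤ 122 := by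
  simp only [PySem.Chars.islower, Bool.and_eq_true, decide_eq_true_eq, Char.le_def,
    UInt32.le_iff_toNat_le]
  exact Iff.rfl
theorem pv_isupper_iff (c : Char) :
    PySem.Chars.isupper c = true ↔ 65 ≤ c.toNat ∧ c.toNat ≤ 90 := by
  simp only [PySem.Chars.isupper, Bool.and_eq_true, decide_eq_true_eq, Char.le_def,
    UInt32.le_iff_toNat_le]
  exact Iff.rfl

def pvLowDesc : List Char :=
  ['z','y','x','w','v','u','t','s','r','q','p','o','n','m','l','k','j','i','h','g','f','e','d','c','b','a']
def pvUpDesc : List Char :=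
  ['Z','Y','X','W','V','U','T','S','R','Q','P','O','N','M','L','K','J','I','H','G','F','E','D','C','B','A']

theorem pv_char_eq_ofNat (c : Char) : c = Char.ofNat c.toNat := by
  rcases c with ⟨v, h⟩
  simp [Char.ofNat, Char.toNat, h, Char.ofNatAux]

set_option maxRecDepth 8192 in
theorem pv_mem_lowDesc (c : Char) (h : PySem.Chars.islower c = true) : c ∈ pvLowDesc := by
  rcases (pv_islower_iff c).mp h with ⟨h1, h2⟩
  rw [pv_char_eq_ofNat c]
  interval_cases (c.toNat) <;> decide
set_option maxRecDepth 8192 in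
theorem pv_mem_upDesc (c : Char) (h : PySem.Chars.isupper c = true) : c ∈ pvUpDesc := by
  rcases (pv_isupper_iff c).mp h with ⟨h1, h2⟩
  rw [pv_char_eq_ofNat c]
  interval_cases (c.toNat) <;> decide

theorem pv_not_both (c : Char) (h : PySem.Chars.isupper c = true) :
    PySem.Chars.islower c = false := by
  rcases (pv_isupper_iff c).mp h with ⟨h1, h2⟩
  rw [Bool.eq_false_iff]
  intro hl
  rcases (pv_islower_iff c).mp hl with ⟨h3, h4⟩
  omega

-- the two pyRanges of B, mapped through chr, are the literal letter lists
theorem pv_range_low :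
    (PySem.List.pyRange 122 96 (-1)).map (fun code => Char.ofNat code.toNat) = pvLowDesc := by
  decide
theorem pv_range_up :
    (PySem.List.pyRange 90 64 (-1)).map (fun code => Char.ofNat code.toNat) = pvUpDesc := by
  decide

-- every letter in the literal lists is of its class (used for count_filter)
theorem pv_lowDesc_islower : ∀ a ∈ pvLowDesc, PySem.Chars.islower a = true := fun a ha =>
  List.all_eq_true.mp (by decide : pvLowDesc.all PySem.Chars.islower = true) a ha
theorem pv_upDesc_isupper : ∀ a ∈ pvUpDesc, PySem.Chars.isupper a = true := fun a ha =>
  List.all_eq_true.mp (by decide : pvUpDesc.all PySem.Chars.isupper = true) a ha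

-- str.count with a single-character needle is List.count (unfolds Chars.count.go)
theorem pv_count_go_single (c : Char) (l : List Char) : ∀ (fuel acc : Nat), l.length ≤ fuel →
    PySem.Chars.count.go [c] fuel l acc = acc + l.count c := by
  induction l with
  | nil => intro fuel acc h; cases fuel <;> simp [PySem.Chars.count.go]
  | cons h t ih =>
    intro fuel acc hf
    cases fuel with
    | zero => simp at hf
    | succ f =>
      rw [PySem.Chars.count.go]
      simp only [List.isPrefixOf, List.length_cons] at *
      by_cases hc : c = h
      · subst hc
        simp [ih f (acc + 1) (by omega), List.count_cons_self]
        try omega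
      · simp [BEq.beq, hc, Ne.symm hc, ih f acc (by omega)]
        try simp [List.count_cons, Ne.symm hc]

-- A's pair loop, split into the two independent filter loops
theorem pv_A_loop (cs : List Char) :
    cs.foldl (fun (acc : List Char × List Char) c =>
        if PySem.Chars.islower c then (acc.1 ++ [c], acc.2)
        else if PySem.Chars.isupper c then (acc.1, acc.2 ++ [c])
        else acc) ([], [])
      = (cs.filter PySem.Chars.islower, cs.filter PySem.Chars.isupper) := by
  have hfun : (fun (acc : List Char × List Char) c =>
        if PySem.Chars.islower c then (acc.1 ++ [c], acc.2)
        else if PySem.Chars.isupper c then (acc.1, acc.2 ++ [c])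
        else acc)
      = fun (acc : List Char × List Char) c =>
        ((fun (a : List Char) c => if PySem.Chars.islower c then a ++ [c] else a) acc.1 c,
         (fun (b : List Char) c =>
            if PySem.Chars.islower c then b
            else if PySem.Chars.isupper c then b ++ [c] else b) acc.2 c) := by
    funext acc c
    by_cases hl : PySem.Chars.islower c <;> by_cases hu : PySem.Chars.isupper c <;> simp [hl, hu]
  rw [hfun, PySem.List.foldl_prod_mk
      (f := fun (a : List Char) c => if PySem.Chars.islower c then a ++ [c] else a)
      (g := fun (b : List Char) c =>
        if PySem.Chars.islower c then b
        else if PySem.Chars.isupper c then b ++ [c] else b)]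
  have hg : cs.foldl (fun (b : List Char) c =>
        if PySem.Chars.islower c then b
        else if PySem.Chars.isupper c then b ++ [c] else b) []
      = cs.filter PySem.Chars.isupper := by
    have hgfun : (fun (b : List Char) c =>
          if PySem.Chars.islower c then b
          else if PySem.Chars.isupper c then b ++ [c] else b)
        = fun (b : List Char) c =>
          if (!PySem.Chars.islower c && PySem.Chars.isupper c) then b ++ [c] else b := by
      funext b c
      by_cases hl : PySem.Chars.islower c <;> by_cases hu : PySem.Chars.isupper c <;> simp [hl, hu]
    rw [hgfun, PySem.List.foldl_append_if_eq_filter]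
    simp only [List.nil_append]
    refine List.filter_congr (fun c _ => ?_)
    by_cases hu : PySem.Chars.isupper c
    · simp [hu, pv_not_both c hu]
    · simp [hu]
  rw [PySem.List.foldl_append_if_eq_filter, hg]
  simp

-- ===== VERDICT (by name: the statement is the Claim_ definition above) =====
set_option maxRecDepth 8192 in
theorem solution_spec : Claim_equal_solution := by
  intro s _
  unfold Spec_solution solution solution_alt
  simp only [PySem.Str.len_eq]
  rw [PySem.List.foldl_pyRange_zero_pyGetD' s.toList ' '
      (fun (acc : List Char × List Char) c =>
        if PySem.Chars.islower c then (acc.1 ++ [c], acc.2)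
        else if PySem.Chars.isupper c then (acc.1, acc.2 ++ [c])
        else acc) ([], [])]
  rw [pv_A_loop]
  -- B side: unfold the two outer iterations and turn the append loops into flatMaps
  simp only [List.foldl_cons, List.foldl_nil]
  rw [PySem.List.foldl_append_eq_flatMap, PySem.List.foldl_append_eq_flatMap]
  simp only [List.nil_append]
  -- s.count(ch) for a single character is the List.count of that character
  have hcount : ∀ ch : Char,
      PySem.Str.count s (String.ofList [ch]) = s.toList.count ch := by
    intro ch
    simp only [PySem.Str.count, String.toList_ofList, PySem.Chars.count, List.isEmpty_cons,
      Bool.false_eq_true, if_false]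
    rw [pv_count_go_single ch s.toList s.toList.length 0 le_rfl]
    omega
  -- name the replicate body and pass through the literal letter lists
  have hlowmap := pv_range_low
  have hupmap := pv_range_up
  have hflat : ∀ (R : List Int) (lit : List Char),
      (R.map (fun code => Char.ofNat code.toNat)) = lit →
      R.flatMap (fun code =>
        List.replicate (PySem.Str.count s (String.ofList [Char.ofNat code.toNat]))
          (Char.ofNat code.toNat))
        = lit.flatMap (fun ch => List.replicate (s.toList.count ch) ch) := by
    intro R lit hR
    rw [← hR, List.flatMap_map]
    exact List.flatMap_congr (fun code _ => by rw [hcount])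
  rw [show ((122 : Int) - 26) = 96 from rfl, show ((90 : Int) - 26) = 64 from rfl]
  rw [hflat _ _ hlowmap, hflat _ _ hupmap]
  -- A side: sort-then-reverse is the counting-sort flatMap
  have hlow := pv_sorted_reverse_eq_flatMap pvLowDesc (s.toList.filter PySem.Chars.islower)
      (fun ch => s.toList.count ch) (by decide) (by decide)
      (fun c hc => by
        rw [List.mem_reverse]
        exact pv_mem_lowDesc c (List.of_mem_filter hc))
      (fun a ha => (List.count_filter (pv_lowDesc_islower a ha)).symm)
  have hup := pv_sorted_reverse_eq_flatMap pvUpDesc (s.toList.filter PySem.Chars.isupper)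
      (fun ch => s.toList.count ch) (by decide) (by decide)
      (fun c hc => by
        rw [List.mem_reverse]
        exact pv_mem_upDesc c (List.of_mem_filter hc))
      (fun a ha => (List.count_filter (pv_upDesc_isupper a ha)).symm)
  rw [hlow, hup]
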